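-- pv_equiv track=rewrite | github.com/jchinnam/advent-of-code | 2021/12/12.py | valid_two
-- ===== SOURCE A (Python) =====
-- def valid_two(path): # Verify any small caves are only present once.
--     if len(path) > 1 and path[-1] == 'start': # do not allow us to return to start
--         return False
--
--     small_caves = []
--     for cave in path:
--         if cave.islower():
--             small_caves.append(cave)
--
--     return len(set(small_caves)) == len(small_caves) or len(set(small_caves)) + 1 == len(small_caves)
-- ===== SOURCE B (Python) =====
-- def valid_two(path):
--     if len(path) > 1 and path[-1] == 'start':  # do not allow us to return to start
--         return False
--     seen = set()
--     used_double = False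
--     for cave in path:
--         if cave.islower():
--             if cave in seen:
--                 if used_double:
--                     return False
--                 used_double = True
--             else:
--                 seen.add(cave)
--     return True
-- ===== Notes on version B (the rewrite author's own statement) =====
-- stated objective: simpler
-- what changed: Replaces A's build-a-list-then-compare-set-and-list-lengths check with a single early-exiting scan that maintains a seen-set and a used-double flag.
import Mathlib
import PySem

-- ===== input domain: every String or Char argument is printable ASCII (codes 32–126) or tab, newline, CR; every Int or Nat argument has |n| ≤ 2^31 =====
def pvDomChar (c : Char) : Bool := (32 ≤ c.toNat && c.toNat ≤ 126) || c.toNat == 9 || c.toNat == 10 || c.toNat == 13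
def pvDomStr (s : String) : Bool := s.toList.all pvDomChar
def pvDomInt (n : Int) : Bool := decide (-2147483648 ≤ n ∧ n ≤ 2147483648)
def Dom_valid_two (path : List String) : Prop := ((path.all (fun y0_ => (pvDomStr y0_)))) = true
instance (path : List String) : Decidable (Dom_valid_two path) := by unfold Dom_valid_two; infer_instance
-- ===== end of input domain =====

-- B changes A's list-building + set/list length comparison into one early-exiting scan
-- with a seen-set and a used-double flag (objective: simpler).

-- ===== PORT A =====
-- Python str.islower(): at least one cased char and no uppercase cased char; exact on the
-- ASCII domain, where the cased chars are exactly the letters.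
def pyStrIslower (s : String) : Bool :=
  s.toList.any PySem.Chars.islower && s.toList.all (fun c => !PySem.Chars.isupper c)

def valid_two (path : List String) : Bool :=
  if decide (path.length > 1) && (PySem.List.pyGet? path (-1) == some "start") then false
  else
    let small_caves := path.foldl (fun acc cave => if pyStrIslower cave then acc ++ [cave] else acc) []
    (PySem.Set.ofList small_caves).length == small_caves.length
      || (PySem.Set.ofList small_caves).length + 1 == small_caves.length

-- ===== PORT B =====
def scanTwo : List String → PySem.Set String → Bool → Bool
  | [], _, _ => true
  | cave :: rest, seen, used_double =>
    if pyStrIslower cave then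
      if PySem.Set.contains seen cave then
        if used_double then false else scanTwo rest seen true
      else scanTwo rest (PySem.Set.add seen cave) used_double
    else scanTwo rest seen used_double

def valid_two_alt (path : List String) : Bool :=
  if decide (path.length > 1) && (PySem.List.pyGet? path (-1) == some "start") then false
  else scanTwo path PySem.Set.empty false

-- ===== PRECONDITION & SPEC =====
def Spec_valid_two (path : List String) (out : Bool) : Prop := out = valid_two_alt path
instance (path : List String) (out : Bool) : Decidable (Spec_valid_two path out) := by unfold Spec_valid_two; infer_instance

-- ===== CLAIM (what is proved, stated in full; the proofs are below) =====
def Claim_equal_valid_two : Prop := ∀ (path : List String), Dom_valid_two path → Spec_valid_two path (valid_two path)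

-- ===== LEMMAS AND PROOFS =====

-- number of duplicate small-cave occurrences encountered by the scan
def dupCount : List String → PySem.Set String → Nat
  | [], _ => 0
  | cave :: rest, seen =>
    if pyStrIslower cave then
      if PySem.Set.contains seen cave then 1 + dupCount rest seen
      else dupCount rest (PySem.Set.add seen cave)
    else dupCount rest seen

theorem scanTwo_eq_dupCount (l : List String) :
    ∀ (seen : PySem.Set String) (used : Bool),
      scanTwo l seen used = decide (dupCount l seen + (cond used 1 0) ≤ 1) := by
  induction l with
  | nil => intro seen used; cases used <;> simp [scanTwo, dupCount]
  | cons c r ih =>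
    intro seen used
    simp only [scanTwo, dupCount]
    by_cases hl : pyStrIslower c = true
    · by_cases hc : PySem.Set.contains seen c = true
      · have hmem : c ∈ seen := by simpa [PySem.Set.contains] using hc
        cases used with
        | false =>
          simp only [hl, hc, if_pos, Bool.false_eq_true, if_false, ih, cond_true, cond_false,
            decide_eq_decide]
          omega
        | true =>
          have : ¬ ((1 + dupCount r seen) + 1 ≤ 1) := by omega
          simp [hl, hmem, this]
      · have hmem : c ∉ seen := by simpa [PySem.Set.contains] using hc
        simp [hl, hmem, ih]
    · simp only [Bool.not_eq_true] at hl
      simp [hl, ih]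

theorem dupCount_update (l : List String) :
    ∀ (seen : PySem.Set String),
      dupCount l seen + (PySem.Set.update seen (l.filter pyStrIslower)).length
        = seen.length + (l.filter pyStrIslower).length := by
  induction l with
  | nil => intro seen; simp [dupCount, PySem.Set.update]
  | cons c r ih =>
    intro seen
    by_cases hl : pyStrIslower c = true
    · by_cases hc : PySem.Set.contains seen c = true
      · have hmem : c ∈ seen := by simpa [PySem.Set.contains] using hc
        have hadd : PySem.Set.add seen c = seen := by simp [PySem.Set.add, hmem]
        simp only [dupCount, hl, hc, if_pos, List.filter_cons, PySem.Set.update,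
          List.foldl_cons, hadd]
        have := ih seen
        simp only [PySem.Set.update] at this
        simp only [List.length_cons]
        omega
      · have hmem : c ∉ seen := by simpa [PySem.Set.contains] using hc
        have hadd : PySem.Set.add seen c = seen ++ [c] := by simp [PySem.Set.add, hmem]
        simp only [dupCount, hl, hc, if_pos, if_neg, List.filter_cons, PySem.Set.update,
          List.foldl_cons, Bool.not_eq_true]
        have hthis := ih (PySem.Set.add seen c)
        simp only [PySem.Set.update, hadd] at hthis
        simp only [List.length_cons]
        rw [hadd] at *
        simp only [List.length_append, List.length_singleton] at *
        omega
    · simp only [Bool.not_eq_true] at hl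
      simp [dupCount, hl, ih]

theorem foldl_append_filter (l : List String) :
    ∀ (init : List String),
      l.foldl (fun acc cave => if pyStrIslower cave then acc ++ [cave] else acc) init
        = init ++ l.filter pyStrIslower := by
  induction l with
  | nil => intro init; simp
  | cons c r ih =>
    intro init
    by_cases hl : pyStrIslower c = true <;> simp [hl, ih]

-- ===== VERDICT (by name: the statement is the Claim_ definition above) =====
theorem valid_two_spec : Claim_equal_valid_two := by
  intro path _
  unfold Spec_valid_two valid_two valid_two_alt
  by_cases hg : (decide (path.length > 1) && (PySem.List.pyGet? path (-1) == some "start")) = true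
  · simp [hg]
  · rw [if_neg hg, if_neg hg]
    rw [foldl_append_filter, scanTwo_eq_dupCount]
    have h2 := dupCount_update path PySem.Set.empty
    have hofl : PySem.Set.update PySem.Set.empty (path.filter pyStrIslower)
        = PySem.Set.ofList (path.filter pyStrIslower) := rfl
    rw [hofl] at h2
    simp only [PySem.Set.empty, List.length_nil, Nat.zero_add, List.nil_append, cond_false,
      Nat.add_zero] at *
    set n := (path.filter pyStrIslower).length
    set s := (PySem.Set.ofList (path.filter pyStrIslower)).length
    set d := dupCount path PySem.Set.empty
    rw [Bool.eq_iff_iff]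
    simp only [Bool.or_eq_true, beq_iff_eq, decide_eq_true_iff]
    omega
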